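-- pv_equiv track=rewrite | github.com/jackcpennington/aoc-2020 | day15/day15.py | next_n
-- ===== SOURCE A (Python) =====
-- def next_n(nums):
--     if nums[-1] not in set(nums[:-1]):
--         return 0
--     else:
--         values = []
--         prev_count = 0
--         for i in range(len(nums)-1, -1, -1):
--              if nums[i] == nums[-1]:
--                 values.append(i+1)
--                 prev_count += 1
--                 if prev_count == 2:
--                     break
--         return abs(values[0] - values[1])
-- ===== SOURCE B (Python) =====
-- def next_n(nums):
--     pos = {}
--     for i, v in enumerate(nums[:-1]):
--         pos[v] = i
--     last = nums[-1]
--     if last not in pos: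
--         return 0
--     return (len(nums) - 1) - pos[last]
-- ===== Notes on version B (the rewrite author's own statement) =====
-- stated objective: idiomatic
-- what changed: Replaces A's backward scan with early break and two collected positions by a single forward pass building a last-index table over the prefix followed by one dict lookup.
import Mathlib
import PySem

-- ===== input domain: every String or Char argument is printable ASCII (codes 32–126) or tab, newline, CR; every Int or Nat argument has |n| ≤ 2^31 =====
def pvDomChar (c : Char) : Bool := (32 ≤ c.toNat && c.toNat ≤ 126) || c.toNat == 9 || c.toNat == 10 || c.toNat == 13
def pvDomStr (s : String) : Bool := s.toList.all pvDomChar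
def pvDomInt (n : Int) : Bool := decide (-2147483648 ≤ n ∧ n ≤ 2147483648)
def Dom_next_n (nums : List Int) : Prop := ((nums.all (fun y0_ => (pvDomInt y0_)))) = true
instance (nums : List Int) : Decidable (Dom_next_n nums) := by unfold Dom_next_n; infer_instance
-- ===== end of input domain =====

-- B builds a last-index table over the prefix in one forward pass and does a single lookup,
-- instead of A's backward scan collecting two positions with an early break (idiomatic rewrite, same cost).


-- ===== PORT A =====
-- A's backward loop: for i in range(len(nums)-1, -1, -1): collect i+1 on match, break at 2
def aLoop (nums : List Int) (last : Int) : List Int → List Int × Int → List Int × Int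
  | [], st => st
  | i :: rest, (values, cnt) =>
    if PySem.List.pyGetD nums i 0 == last then
      let values' := values ++ [i + 1]
      let cnt' := cnt + 1
      if cnt' == 2 then (values', cnt')
      else aLoop nums last rest (values', cnt')
    else aLoop nums last rest (values, cnt)

def next_n (nums : List Int) : Int :=
  let last := PySem.List.pyGetD nums (-1) 0
  if ¬ (last ∈ PySem.Set.ofList (PySem.List.slice nums none (some (-1)))) then 0
  else
    let st := aLoop nums last (PySem.List.pyRange ((nums.length : Int) - 1) (-1) (-1)) ([], 0)
    |PySem.List.pyGetD st.1 0 0 - PySem.List.pyGetD st.1 1 0|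

-- ===== PORT B =====
def next_n_alt (nums : List Int) : Int :=
  let pos := (PySem.List.enumerate (PySem.List.slice nums none (some (-1))) 0).foldl
      (fun d p => d.insert p.2 p.1) (PySem.Dict.empty : PySem.Dict Int Int)
  let last := PySem.List.pyGetD nums (-1) 0
  match pos.get? last with
  | none => 0
  | some p => (nums.length : Int) - 1 - p

-- ===== PRECONDITION & SPEC =====
-- Pre_ excludes only the empty list, on which A raises IndexError (nums[-1]); B raises there too.
def Pre_next_n (nums : List Int) : Prop := nums ≠ []
instance (nums : List Int) : Decidable (Pre_next_n nums) := by unfold Pre_next_n; infer_instance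
def pvWitness_next_n : List Int := [0, 3, 6, 0]

def Spec_next_n (nums : List Int) (out : Int) : Prop := out = next_n_alt nums
instance (nums : List Int) (out : Int) : Decidable (Spec_next_n nums out) := by unfold Spec_next_n; infer_instance

-- ===== CLAIM (what is proved, stated in full; the proofs are below) =====
def Claim_equal_next_n : Prop := ∀ (nums : List Int), Dom_next_n nums → Pre_next_n nums → Spec_next_n nums (next_n nums)

-- ===== LEMMAS AND PROOFS =====

-- find? respects pointwise-equal predicates on members
theorem find?_congr_mem {α : Type} {p q : α → Bool} : ∀ (l : List α),
    (∀ x ∈ l, p x = q x) → l.find? p = l.find? q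
  | [], _ => rfl
  | x :: xs, h => by
    simp only [List.find?_cons, h x (by simp)]
    cases hq : q x with
    | true => rfl
    | false => exact find?_congr_mem xs (fun y hy => h y (by simp [hy]))

-- A's loop from state (values, 1): appends (first match)+1 and stops, or leaves state alone
theorem aLoop_one (nums : List Int) (last : Int) : ∀ (L values : List Int),
    aLoop nums last L (values, 1) =
      match L.find? (fun i => PySem.List.pyGetD nums i 0 == last) with
      | some j => (values ++ [j + 1], 2)
      | none => (values, 1)
  | [], values => rfl
  | i :: rest, values => by
    simp only [aLoop, List.find?_cons]
    cases h : (PySem.List.pyGetD nums i 0 == last) with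
    | true => rfl
    | false => exact aLoop_one nums last rest values

-- B's dict lookup = last matching index of the enumeration
theorem getB (v : Int) : ∀ (xs : List (Int × Int)) (d : PySem.Dict Int Int),
    (xs.foldl (fun d p => d.insert p.2 p.1) d).get? v =
      match xs.reverse.find? (fun p => p.2 == v) with
      | some p => some p.1
      | none => d.get? v := by
  intro xs
  induction xs using List.reverseRecOn with
  | nil => intro d; rfl
  | append_singleton ys p ih =>
    intro d
    simp only [List.foldl_append, List.foldl_cons, List.foldl_nil, List.reverse_append,
      List.reverse_cons, List.reverse_nil, List.nil_append, List.cons_append, List.find?_cons]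
    cases h : (p.2 == v) with
    | true =>
      have : v = p.2 := (beq_iff_eq.mp h).symm
      subst this
      simp [PySem.Dict.get?_insert_self]
    | false =>
      have hne : v ≠ p.2 := fun he => by simp [he] at h
      rw [PySem.Dict.get?_insert_of_ne (hne := hne), ih d]

theorem next_n_eq (nums : List Int) (h : nums ≠ []) : next_n nums = next_n_alt nums := by
  have hn : 1 ≤ nums.length := List.length_pos_of_ne_nil h
  unfold next_n next_n_alt
  rw [PySem.List.slice_to_neg_one]
  -- the last element, as an indexed access
  have htn : ((nums.length : Int) - 1).toNat = nums.length - 1 := by omega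
  have hlastget : PySem.List.pyGetD nums ((nums.length : Int) - 1) 0
      = PySem.List.pyGetD nums (-1) 0 := by
    rw [PySem.List.pyGetD_eq_getElem (h0 := by omega) (h1 := by exact_mod_cast by omega),
        PySem.List.pyGetD_neg_one (h := h), List.getLast_eq_getElem]
    simp [htn]
  -- the descending index range, split at its head
  have hR : PySem.List.pyRange ((nums.length : Int) - 1) (-1) (-1)
      = ((nums.length : Int) - 1) :: (PySem.List.pyRange 0 ((nums.length : Int) - 1) 1).reverse := by
    rw [PySem.List.pyRange_neg_one_cons (by omega), PySem.List.pyRange_neg_one_eq_reverse]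
    norm_num
  rw [hR]
  simp only [aLoop, hlastget, BEq.rfl, if_true, beq_iff_eq]
  norm_num
  rw [aLoop_one]
  -- same predicate over the prefix
  have hpred : (PySem.List.pyRange 0 ((nums.length : Int) - 1) 1).reverse.find?
        (fun i => PySem.List.pyGetD nums i 0 == PySem.List.pyGetD nums (-1) 0)
      = (PySem.List.pyRange 0 ((nums.length : Int) - 1) 1).reverse.find?
        (fun i => PySem.List.pyGetD nums.dropLast i 0 == PySem.List.pyGetD nums (-1) 0) := by
    apply find?_congr_mem
    intro j hj
    rw [List.mem_reverse, PySem.List.mem_pyRange_one] at hj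
    have hjlt : j.toNat < nums.dropLast.length := by
      rw [List.length_dropLast]; omega
    rw [PySem.List.pyGetD_eq_getElem (h0 := hj.1) (h1 := by omega),
        PySem.List.pyGetD_eq_getElem (h0 := hj.1) (h1 := by omega),
        List.getElem_dropLast]
  -- B side: dict lookup = last matching index
  have hlen : ((nums.dropLast.length : Int)) = (nums.length : Int) - 1 := by
    rw [List.length_dropLast]; omega
  rw [getB, PySem.List.enumerate_eq_map_pyRange (d := 0), ← List.map_reverse, List.find?_map,
      PySem.List.len_eq, hlen]
  simp only [Function.comp_def]
  rw [hpred]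
  cases hf : (PySem.List.pyRange 0 ((nums.length : Int) - 1) 1).reverse.find?
      (fun i => PySem.List.pyGetD nums.dropLast i 0 == PySem.List.pyGetD nums (-1) 0) with
  | none =>
    -- no earlier occurrence: the guard is false on both sides
    have hnm : PySem.List.pyGetD nums (-1) 0 ∉ nums.dropLast := by
      intro hmem
      obtain ⟨k, hk, hkv⟩ := List.mem_iff_getElem.mp hmem
      have hfr := List.find?_eq_none.mp hf (k : Int)
      simp only [List.mem_reverse, PySem.List.mem_pyRange_one] at hfr
      have hk' : (k : Int) < (nums.length : Int) - 1 := by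
        rw [List.length_dropLast] at hk; omega
      have := hfr ⟨by omega, hk'⟩
      rw [PySem.List.pyGetD_eq_getElem (h0 := by omega) (h1 := by exact_mod_cast hk)] at this
      simp [Int.toNat_natCast, hkv] at this
    rw [if_neg hnm]
    simp [PySem.Dict.get?_empty]
  | some j =>
    -- j is the most recent earlier index of the last value
    have hjmem := List.mem_of_find?_eq_some hf
    rw [List.mem_reverse, PySem.List.mem_pyRange_one] at hjmem
    have hjpred := List.find?_some hf
    have hjv : nums.dropLast[j.toNat]'(by rw [List.length_dropLast]; omega)
        = PySem.List.pyGetD nums (-1) 0 := by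
      rw [beq_iff_eq] at hjpred
      rw [← hjpred, PySem.List.pyGetD_eq_getElem (h0 := hjmem.1)
        (h1 := by rw [hlen]; exact hjmem.2)]
    have hmem : PySem.List.pyGetD nums (-1) 0 ∈ nums.dropLast := by
      rw [← hjv]; exact List.getElem_mem _
    rw [if_pos hmem]
    have habs : |(nums.length : Int) - (j + 1)| = (nums.length : Int) - 1 - j := by
      rw [abs_of_nonneg (by omega)]; ring
    simp [pysem, habs]

-- ===== VERDICT (by name: the statement is the Claim_ definition above) =====
theorem next_n_spec : Claim_equal_next_n := by
  intro nums _ hpre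
  unfold Spec_next_n
  exact next_n_eq nums hpre
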